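-- pv_equiv track=rewrite | github.com/Darksword333/algo2 | vrac/autre versions/ex14.py | pmax
-- ===== SOURCE A (Python) =====
-- def sum(a:list[int], i:int)->int:
--     #@ variant i
--     return a[i-1]+sum(a,i-1) if 0<i and i<=len(a) else 0
--
-- def pmax(a:list[int])->int:
--     #@requires len(a)>0
--     #@requires a[0]==0
--     #@ensures 0<=result<len(a)
--     #@ensures a[result] == sum(a,result-1)
--     i=0
--     max_somme = 0
--     max_indice = 0
--     while i<len(a):
--         #@variant len(a)-i
--         #@invariant 0<=i<=len(a)
--         #@invariant 0<=max_indice<len(a)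
--         #@invariant max_indice<=i
--         #@invariant a[max_indice] == sum(a,max_indice-1)
--         #@invariant max_somme == a[max_indice]
--         if sum(a,i-1)==a[i] and a[i]>max_somme:
--             max_somme = a[i]
--             max_indice = i
--         i=i+1
--
--     return max_indice
-- ===== SOURCE B (Python) =====
-- def pmax(a: list[int]) -> int:
--     # One pass with an incrementally maintained prefix sum (delayed by one
--     # element): p always equals sum(a[:i-1]) when index i is examined.
--     # Index 0 can never satisfy the condition (it needs a[0] == 0 < a[0]),
--     # so the scan starts at index 1.
--     if not a:
--         return 0
--     best_i = 0
--     best_v = 0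
--     p = 0            # sum of a[:i-1]
--     prev = a[0]      # a[i-1]
--     for i in range(1, len(a)):
--         x = a[i]
--         if p == x and x > best_v:
--             best_v = x
--             best_i = i
--         p += prev
--         prev = x
--     return best_i
-- ===== Notes on version B (the rewrite author's own statement) =====
-- stated objective: faster
-- what changed: Replaces A's per-index recursive recomputation of the prefix sum with a single pass that maintains the prefix sum incrementally (one-element delay), removing the inner O(n) recursion.
import Mathlib
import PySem

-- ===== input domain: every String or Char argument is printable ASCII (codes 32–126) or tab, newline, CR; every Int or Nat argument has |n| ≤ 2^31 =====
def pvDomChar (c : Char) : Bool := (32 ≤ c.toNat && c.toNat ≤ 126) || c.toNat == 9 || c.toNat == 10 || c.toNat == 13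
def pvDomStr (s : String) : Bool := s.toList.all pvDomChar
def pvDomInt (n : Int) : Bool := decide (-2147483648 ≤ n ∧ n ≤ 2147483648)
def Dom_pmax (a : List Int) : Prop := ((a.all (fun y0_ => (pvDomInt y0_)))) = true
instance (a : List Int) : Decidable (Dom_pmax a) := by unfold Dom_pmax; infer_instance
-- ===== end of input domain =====

-- B maintains the prefix sum incrementally in one pass instead of A's per-index recursive recomputation (asymptotically faster, measured).

-- ===== PORT A =====
-- Python's recursive `sum(a, i)`: a[i-1] + sum(a, i-1) while 0 < i ≤ len(a), else 0.
def pySum (a : List Int) (i : Int) : Int :=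
  if h : 0 < i ∧ i ≤ (a.length : Int) then
    (PySem.List.pyGet? a (i - 1)).getD 0 + pySum a (i - 1)
  else 0
termination_by i.toNat
decreasing_by omega

-- the while loop over i = 0 .. len(a)-1, state (max_somme, max_indice)
def pmax (a : List Int) : Int :=
  (((List.range a.length).foldl
      (fun (st : Int × Int) (i : Nat) =>
        let ai := (PySem.List.pyGet? a (i : Int)).getD 0
        if pySum a ((i : Int) - 1) = ai ∧ st.1 < ai then (ai, (i : Int)) else st)
      (0, 0))).2

-- ===== PORT B =====
-- one pass: p = sum(a[:i-1]), prev = a[i-1] when the element at index i is examined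
def pmaxGo (p prev bv bi : Int) (i : Nat) : List Int → Int
  | [] => bi
  | x :: rest =>
    if p = x ∧ bv < x then pmaxGo (p + prev) x x (i : Int) (i + 1) rest
    else pmaxGo (p + prev) x bv bi (i + 1) rest

def pmax_alt (a : List Int) : Int :=
  match a with
  | [] => 0
  | x :: rest => pmaxGo 0 x 0 0 1 rest

-- ===== PRECONDITION & SPEC =====
def Spec_pmax (a : List Int) (out : Int) : Prop := out = pmax_alt a
instance (a : List Int) (out : Int) : Decidable (Spec_pmax a out) := by unfold Spec_pmax; infer_instance

-- ===== CLAIM (what is proved, stated in full; the proofs are below) =====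
def Claim_equal_pmax : Prop := ∀ (a : List Int), Dom_pmax a → Spec_pmax a (pmax a)

-- ===== LEMMAS AND PROOFS =====

-- pySum a k is the sum of the first k elements
theorem pySum_eq_sum_take (a : List Int) : ∀ (k : Nat), k ≤ a.length →
    pySum a (k : Int) = ((a.take k).sum) := by
  intro k
  induction k with
  | zero => intro _; rw [pySum]; simp
  | succ n ih =>
    intro hk
    rw [pySum]
    have hn : n < a.length := by omega
    have : (0 : Int) < (n + 1 : Nat) ∧ ((n + 1 : Nat) : Int) ≤ (a.length : Int) := by
      constructor <;> [positivity; exact_mod_cast hk]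
    rw [dif_pos this]
    have h1 : ((n + 1 : Nat) : Int) - 1 = (n : Int) := by push_cast; ring
    rw [h1, PySem.List.pyGet?_natCast, ih (by omega)]
    rw [List.getElem?_eq_getElem hn]
    rw [List.take_add_one, List.sum_append]
    simp [List.getElem?_eq_getElem hn]
    ring

-- the foldl over the remaining indices equals B's one-pass recursion
theorem foldl_eq_go (a : List Int) : ∀ (k i : Nat) (bv bi : Int),
    1 ≤ i → i + k = a.length →
    (((List.range' i k).foldl
        (fun (st : Int × Int) (j : Nat) =>
          let aj := (PySem.List.pyGet? a (j : Int)).getD 0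
          if pySum a ((j : Int) - 1) = aj ∧ st.1 < aj then (aj, (j : Int)) else st)
        (bv, bi))).2
      = pmaxGo ((a.take (i - 1)).sum) (a.getD (i - 1) 0) bv bi i (a.drop i) := by
  intro k
  induction k with
  | zero =>
    intro i bv bi _ hlen
    have : a.drop i = [] := by
      apply List.drop_eq_nil_of_le; omega
    simp [this, pmaxGo]
  | succ n ih =>
    intro i bv bi hi hlen
    have hilt : i < a.length := by omega
    have hdrop : a.drop i = a[i] :: a.drop (i + 1) :=
      List.drop_eq_getElem_cons hilt
    have hget : (PySem.List.pyGet? a ((i : Nat) : Int)).getD 0 = a[i] := by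
      rw [PySem.List.pyGet?_natCast]
      simp [List.getElem?_eq_getElem hilt]
    have hsum : pySum a ((i : Int) - 1) = (a.take (i - 1)).sum := by
      have h1 : ((i : Int)) - 1 = ((i - 1 : Nat) : Int) := by omega
      rw [h1, pySum_eq_sum_take a (i - 1) (by omega)]
    have hnextsum : (a.take (i - 1)).sum + a.getD (i - 1) 0 = (a.take i).sum := by
      have hi1 : i - 1 < a.length := by omega
      have hstep : i = (i - 1) + 1 := by omega
      rw [List.getD_eq_getElem a 0 hi1]
      conv_rhs => rw [hstep]
      rw [List.take_add_one, List.sum_append]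
      simp [List.getElem?_eq_getElem hi1]
    have hnextprev : a.getD i 0 = a[i] := List.getD_eq_getElem a 0 hilt
    rw [List.range'_succ, List.foldl_cons]
    simp only [hget, hsum]
    rw [hdrop]
    by_cases hc : (a.take (i - 1)).sum = a[i] ∧ bv < a[i]
    · rw [if_pos hc]
      rw [pmaxGo, if_pos hc]
      have := ih (i + 1) a[i] (i : Int) (by omega) (by omega)
      simp only [Nat.add_sub_cancel] at this
      rw [this, hnextsum, hnextprev]
    · rw [if_neg hc]
      rw [pmaxGo, if_neg hc]
      have := ih (i + 1) bv bi (by omega) (by omega)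
      simp only [Nat.add_sub_cancel] at this
      rw [this, hnextsum, hnextprev]

-- ===== VERDICT (by name: the statement is the Claim_ definition above) =====
theorem pmax_spec : Claim_equal_pmax := by
  intro a _
  unfold Spec_pmax pmax pmax_alt
  match a with
  | [] => simp
  | x :: rest =>
    have hlen : (x :: rest).length = 1 + rest.length := by simp; omega
    have hrange : List.range (x :: rest).length = 0 :: List.range' 1 rest.length := by
      rw [List.range_eq_range', hlen, Nat.add_comm, List.range'_succ]
    rw [hrange, List.foldl_cons]
    have hfirst : (if pySum (x :: rest) ((0:Nat) - 1 : Int) = (PySem.List.pyGet? (x :: rest) ((0:Nat) : Int)).getD 0 ∧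
              (0:Int) < (PySem.List.pyGet? (x :: rest) ((0:Nat) : Int)).getD 0 then
          ((PySem.List.pyGet? (x :: rest) ((0:Nat) : Int)).getD 0, ((0:Nat) : Int))
        else ((0:Int), (0:Int))) = ((0:Int), (0:Int)) := by
      rw [if_neg]
      rintro ⟨h1, h2⟩
      rw [pySum] at h1
      simp [PySem.List.pyGet?, PySem.List.pyIdx?] at h1 h2
      omega
    rw [hfirst]
    have := foldl_eq_go (x :: rest) rest.length 1 0 0 (le_refl 1) (by simp only [List.length_cons]; omega)
    simp only [Nat.sub_self, List.take_zero, List.sum_nil, List.getD_cons_zero,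
      List.drop_one, List.tail_cons] at this
    exact this
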